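-- pv_equiv track=rewrite | github.com/agrawal-khushboo/ECE-143 | word_process.py | get_most_common_end
-- ===== SOURCE A (Python) =====
-- def get_most_common_end(words):
--     """
--     the most common ending letter
--     """
--     dic={}
--     assert type(words)==list
--     assert len(words)>0
--     for w in words:
--         assert type(w)==str
--         dic[w[-1]]=0
--     for w in words:
--         dic[w[-1]]+=1
--     word=sorted(dic.items(), key=lambda item: item[1],reverse=True)
--     letter=word[0][0]
--     return letter
-- ===== SOURCE B (Python) =====
-- def get_most_common_end(words):
--     """
--     the most common ending letter
--     """
--     assert type(words)==list
--     assert len(words)>0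
--     counts = {}
--     for w in words:
--         assert type(w)==str
--         c = w[-1]
--         counts[c] = counts.get(c, 0) + 1
--     best_letter, best_count = None, -1
--     for letter, count in counts.items():
--         if count > best_count:
--             best_letter, best_count = letter, count
--     return best_letter
-- ===== Notes on version B (the rewrite author's own statement) =====
-- stated objective: simpler
-- what changed: counts are built in one dict pass instead of two, and the winner is found by a single strict-> max scan over the items instead of materialising a full descending sort; strict > preserves the stable-sort first-insertion tie-break
import Mathlib
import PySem

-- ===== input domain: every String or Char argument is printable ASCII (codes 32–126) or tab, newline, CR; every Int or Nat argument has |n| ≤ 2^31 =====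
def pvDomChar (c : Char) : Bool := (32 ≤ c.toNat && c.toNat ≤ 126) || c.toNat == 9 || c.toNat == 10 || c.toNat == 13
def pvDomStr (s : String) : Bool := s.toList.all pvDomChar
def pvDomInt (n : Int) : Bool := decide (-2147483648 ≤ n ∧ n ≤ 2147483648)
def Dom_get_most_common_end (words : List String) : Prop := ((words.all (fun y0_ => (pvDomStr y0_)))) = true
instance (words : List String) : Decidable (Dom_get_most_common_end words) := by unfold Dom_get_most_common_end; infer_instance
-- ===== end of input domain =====

-- B replaces A's two counting passes plus a full descending sort of the items by a single
-- counting pass and one strict-> max scan over the items (same result; no speed claim).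

-- w[-1]: Python raises IndexError on the empty string; Pre_ excludes "" so the default is never reached.
def pyLast (w : String) : Char := ((PySem.Str.pyGet? w (-1)).getD ' ')

-- ===== PORT A =====
def get_most_common_end (words : List String) : String :=
  -- dic = {}; for w in words: dic[w[-1]] = 0
  let dic0 : PySem.Dict Char Int :=
    words.foldl (fun d w => d.insert (pyLast w) 0) PySem.Dict.empty
  -- for w in words: dic[w[-1]] += 1
  let dic : PySem.Dict Char Int :=
    words.foldl (fun d w => d.insert (pyLast w) (d.getD (pyLast w) 0 + 1)) dic0
  -- word = sorted(dic.items(), key=lambda item: item[1], reverse=True); letter = word[0][0]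
  let word := PySem.List.sorted dic.items (fun item => item.2) true
  match word.head? with
  | some p => String.mk [p.1]
  | none => ""   -- unreachable: Pre_ demands words ≠ []

-- ===== PORT B =====
def get_most_common_end_alt (words : List String) : String :=
  -- counts = {}; for w in words: c = w[-1]; counts[c] = counts.get(c, 0) + 1
  let counts : PySem.Dict Char Int :=
    words.foldl (fun d w => d.insert (pyLast w) (d.getD (pyLast w) 0 + 1)) PySem.Dict.empty
  -- best_letter, best_count = None, -1; for letter, count in counts.items(): if count > best_count: …
  let best : Option Char × Int :=
    counts.items.foldl (fun b p => if b.2 < p.2 then (some p.1, p.2) else b) (none, -1)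
  match best.1 with
  | some c => String.mk [c]
  | none => ""   -- unreachable: Pre_ demands words ≠ []

-- ===== PRECONDITION & SPEC =====
-- A raises (AssertionError on the empty list; IndexError on w[-1] for an empty word) exactly outside Pre_.
def Pre_get_most_common_end (words : List String) : Prop :=
  words ≠ [] ∧ ∀ w ∈ words, w ≠ ""
instance (words : List String) : Decidable (Pre_get_most_common_end words) := by
  unfold Pre_get_most_common_end; infer_instance

def pvWitness_get_most_common_end : List String := ["ab", "cb", "d"]

def Spec_get_most_common_end (words : List String) (out : String) : Prop := out = get_most_common_end_alt words
instance (words : List String) (out : String) : Decidable (Spec_get_most_common_end words out) := by unfold Spec_get_most_common_end; infer_instance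

-- ===== CLAIM (what is proved, stated in full; the proofs are below) =====
def Claim_equal_get_most_common_end : Prop := ∀ (words : List String), Dom_get_most_common_end words → Pre_get_most_common_end words → Spec_get_most_common_end words (get_most_common_end words)

-- ===== LEMMAS AND PROOFS =====

-- the first counting loop of A writes only zeros
theorem getD_foldl_insert_zero (l : List Char) (d : PySem.Dict Char Int) (v : Char)
    (h : d.getD v 0 = 0) :
    (l.foldl (fun d x => d.insert x (0 : Int)) d).getD v 0 = 0 := by
  induction l generalizing d with
  | nil => simpa using h
  | cons x t ih =>
      simp only [List.foldl_cons]
      exact ih _ (by rw [PySem.Dict.getD_insert]; split_ifs <;> simp [h])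

-- updating a set with elements it already holds changes nothing
theorem set_update_of_subset (xs s : List Char) (h : ∀ x ∈ xs, x ∈ s) :
    PySem.Set.update s xs = s := by
  induction xs generalizing s with
  | nil => rfl
  | cons x t ih =>
      have hx : x ∈ s := h x (by simp)
      have : PySem.Set.add s x = s := by
        simp [PySem.Set.add, PySem.Set.contains, hx]
      calc PySem.Set.update s (x :: t)
          = PySem.Set.update (PySem.Set.add s x) t := rfl
        _ = PySem.Set.update s t := by rw [this]
        _ = s := ih s (fun y hy => h y (by simp [hy]))

-- core invariant: continuing A's reverse insertion sort from a list headed by a maximal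
-- element and continuing B's strict-> scan from that head produce matching results
theorem scan_insertBy (L : List (Char × Int)) :
    ∀ (c : Char) (n : Int) (t : List (Char × Int)),
    (∀ y ∈ (c, n) :: t, y.2 ≤ n) →
    ∃ c' n' t',
      L.foldl (fun acc x => PySem.List.insertBy (fun a b => decide (b.2 < a.2)) x acc) ((c, n) :: t)
        = (c', n') :: t' ∧
      (∀ y ∈ (c', n') :: t', y.2 ≤ n') ∧
      L.foldl (fun b p => if b.2 < p.2 then ((some p.1 : Option Char), p.2) else b) (some c, n)
        = (some c', n') := by
  induction L with
  | nil =>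
      intro c n t hmax
      exact ⟨c, n, t, rfl, hmax, rfl⟩
  | cons x L ih =>
      intro c n t hmax
      simp only [List.foldl_cons]
      by_cases hlt : n < x.2
      · have hins : PySem.List.insertBy (fun a b => decide (b.2 < a.2)) x ((c, n) :: t)
            = x :: (c, n) :: t := by
          simp [PySem.List.insertBy, hlt]
        rw [hins]
        have hmax' : ∀ y ∈ (x.1, x.2) :: (c, n) :: t, y.2 ≤ x.2 := by
          intro y hy
          rcases List.mem_cons.mp hy with h | h
          · simp [h]
          · exact le_of_lt (lt_of_le_of_lt (hmax y h) hlt)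
        obtain ⟨c', n', t', h1, h2, h3⟩ := ih x.1 x.2 ((c, n) :: t) hmax'
        exact ⟨c', n', t', by simpa using h1, h2, by simpa [hlt] using h3⟩
      · have hins : PySem.List.insertBy (fun a b => decide (b.2 < a.2)) x ((c, n) :: t)
            = (c, n) :: PySem.List.insertBy (fun a b => decide (b.2 < a.2)) x t := by
          simp [PySem.List.insertBy, hlt]
        rw [hins]
        have hmax' : ∀ y ∈ (c, n) :: PySem.List.insertBy (fun a b => decide (b.2 < a.2)) x t,
            y.2 ≤ n := by
          intro y hy
          rcases List.mem_cons.mp hy with h | h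
          · simp [h]
          · rcases (PySem.List.mem_insertBy _ _ _ _).mp h with h | h
            · subst h; omega
            · exact hmax y (by simp [h])
        obtain ⟨c', n', t', h1, h2, h3⟩ := ih c n _ hmax'
        exact ⟨c', n', t', h1, h2, by simpa [hlt] using h3⟩

-- head of sorted(L, key=count, reverse=True) vs B's (none, -1) max scan, for positive counts
theorem sorted_head_eq_scan (L : List (Char × Int)) (hne : L ≠ [])
    (hpos : ∀ p ∈ L, (0 : Int) < p.2) :
    (match (PySem.List.sorted L (fun item => item.2) true).head? with
      | some p => String.mk [p.1]
      | none => "")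
    = (match (L.foldl (fun b p => if b.2 < p.2 then ((some p.1 : Option Char), p.2) else b)
          ((none : Option Char), -1)).1 with
      | some c => String.mk [c]
      | none => "") := by
  obtain ⟨p, L, rfl⟩ := List.exists_cons_of_ne_nil hne
  rw [PySem.List.sorted_rev_eq_foldl_insertBy]
  simp only [List.foldl_cons]
  have h0 : (-1 : Int) < p.2 := by have := hpos p (by simp); omega
  have hstep : (if ((none : Option Char), (-1 : Int)).2 < p.2
      then ((some p.1 : Option Char), p.2) else ((none : Option Char), -1)) = (some p.1, p.2) := by
    simp [h0]
  rw [hstep]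
  have hins : PySem.List.insertBy (fun a b => decide (b.2 < a.2)) p ([] : List (Char × Int))
      = [(p.1, p.2)] := by simp [PySem.List.insertBy]
  rw [hins]
  obtain ⟨c', n', t', h1, _, h3⟩ := scan_insertBy L p.1 p.2 [] (by simp)
  rw [h1, h3]; rfl

-- both dicts have the same items list: the counted letters in first-occurrence order with their counts
theorem items_eq (ks : List Char) (d0 : PySem.Dict Char Int)
    (hkeys0 : d0.keys = PySem.Set.ofList ks) (hnodup0 : d0.keys.Nodup)
    (hzero : ∀ v, d0.getD v 0 = 0) :
    (ks.foldl (fun d x => d.insert x (d.getD x 0 + 1)) d0).items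
      = (PySem.Dict.counter ks).items := by
  set d1 := ks.foldl (fun d x => d.insert x (d.getD x 0 + 1)) d0 with hd1
  have hkeys1 : d1.keys = PySem.Set.ofList ks := by
    rw [hd1, PySem.Dict.keys_foldl_insert, hkeys0]
    exact set_update_of_subset ks _ (fun x hx => (PySem.Set.mem_ofList _ _).mpr hx)
  have hnodup1 : d1.keys.Nodup := by
    rw [hd1]; exact PySem.Dict.nodup_keys_foldl_insert _ _ _ hnodup0
  rw [PySem.Dict.items_eq_map_keys d1 hnodup1 0, hkeys1, PySem.Dict.items_counter]
  refine List.map_congr_left (fun k hk => ?_)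
  have h1 : d1.getD k 0 = d0.getD k 0 + ks.count k := by
    rw [hd1]; exact PySem.Dict.getD_foldl_insert_add_one ks d0 k
  simp [h1, hzero k]

-- every item of the one-pass counter has a positive count
theorem counter_items_pos (ks : List Char) (p : Char × Int)
    (hp : p ∈ (PySem.Dict.counter ks).items) : (0 : Int) < p.2 := by
  rw [PySem.Dict.items_counter] at hp
  obtain ⟨k, hk, rfl⟩ := List.mem_map.mp hp
  have : k ∈ ks := (PySem.Set.mem_ofList _ _).mp hk
  have : 1 ≤ ks.count k := List.one_le_count_iff.mpr this
  simp; omega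

-- ===== VERDICT (by name: the statement is the Claim_ definition above) =====
theorem get_most_common_end_spec : Claim_equal_get_most_common_end := by
  intro words _ hpre
  unfold Spec_get_most_common_end get_most_common_end get_most_common_end_alt
  have hmap : ∀ (d : PySem.Dict Char Int),
      words.foldl (fun d w => d.insert (pyLast w) (d.getD (pyLast w) 0 + 1)) d
        = (words.map pyLast).foldl (fun d x => d.insert x (d.getD x 0 + 1)) d := by
    intro d; rw [List.foldl_map]
  have hmap0 : words.foldl (fun d w => d.insert (pyLast w) 0) PySem.Dict.empty
      = (words.map pyLast).foldl (fun d x => d.insert x (0 : Int)) PySem.Dict.empty := by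
    rw [List.foldl_map]
  simp only [hmap, hmap0, PySem.Dict.foldl_insert_getD_add_one_eq_counter]
  rw [items_eq (words.map pyLast) _
    (by rw [PySem.Dict.keys_foldl_insert]; rfl)
    (PySem.Dict.nodup_keys_foldl_insert _ _ _ PySem.Dict.nodup_keys_empty)
    (fun v => getD_foldl_insert_zero _ _ v (by simp [pysem]))]
  have hne : (PySem.Dict.counter (words.map pyLast)).items ≠ [] := by
    have hks : words.map pyLast ≠ [] := by
      simp only [ne_eq, List.map_eq_nil_iff]; exact hpre.1
    obtain ⟨k, t, hk⟩ := List.exists_cons_of_ne_nil hks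
    have hkmem : k ∈ PySem.Set.ofList (words.map pyLast) :=
      (PySem.Set.mem_ofList _ _).mpr (by rw [hk]; exact List.mem_cons_self)
    have : (k, ((words.map pyLast).count k : Int)) ∈ (PySem.Dict.counter (words.map pyLast)).items := by
      rw [PySem.Dict.items_counter]
      exact List.mem_map_of_mem hkmem
    exact List.ne_nil_of_mem this
  exact sorted_head_eq_scan _ hne (fun p hp => counter_items_pos _ p hp)
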